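-- pv_equiv track=rewrite | github.com/mortyc126-debug/SHA | ccs_v01.py | sha256_real
-- ===== SOURCE A (Python) =====
-- MASK32 = 0xFFFFFFFF
--
-- K=[0x428a2f98,0x71374491,0xb5c0fbcf,0xe9b5dba5,0x3956c25b,0x59f111f1,0x923f82a4,0xab1c5ed5,0xd807aa98,0x12835b01,0x243185be,0x550c7dc3,0x72be5d74,0x80deb1fe,0x9bdc06a7,0xc19bf174,0xe49b69c1,0xefbe4786,0x0fc19dc6,0x240ca1cc,0x2de92c6f,0x4a7484aa,0x5cb0a9dc,0x76f988da,0x983e5152,0xa831c66d,0xb00327c8,0xbf597fc7,0xc6e00bf3,0xd5a79147,0x06ca6351,0x14292967,0x27b70a85,0x2e1b2138,0x4d2c6dfc,0x53380d13,0x650a7354,0x766a0abb,0x81c2c92e,0x92722c85,0xa2bfe8a1,0xa81a664b,0xc24b8b70,0xc76c51a3,0xd192e819,0xd6990624,0xf40e3585,0x106aa070,0x19a4c116,0x1e376c08,0x2748774c,0x34b0bcb5,0x391c0cb3,0x4ed8aa4a,0x5b9cca4f,0x682e6ff3,0x748f82ee,0x78a5636f,0x84c87814,0x8cc70208,0x9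0befffa,0xa4506ceb,0xbef9a3f7,0xc67178f2]
--
-- IV=[0x6a09e667,0xbb67ae85,0x3c6ef372,0xa54ff53a,0x510e527f,0x9b05688c,0x1f83d9ab,0x5be0cd19]
--
-- def rotr(x,n): return ((x>>n)|(x<<(32-n)))&MASK32
--
-- def ssig0(x): return rotr(x,7)^rotr(x,18)^(x>>3)
--
-- def ssig1(x): return rotr(x,17)^rotr(x,19)^(x>>10)
--
-- def sig0(x): return rotr(x,2)^rotr(x,13)^rotr(x,22)
--
-- def sig1(x): return rotr(x,6)^rotr(x,11)^rotr(x,25)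
--
-- def ch(e,f,g): return (e&f)^(~e&g)&MASK32
--
-- def maj(a,b,c): return (a&b)^(a&c)^(b&c)
--
-- def add_with_carry(a, b):
--     """Return (sum mod 2^32, carry vector)."""
--     s = (a + b) & MASK32
--     c = 0; cv = 0
--     for k in range(32):
--         ak=(a>>k)&1; bk=(b>>k)&1
--         c=(ak&bk)|(ak&c)|(bk&c)
--         cv|=(c<<k)
--     return s, cv
--
-- def sha256_real(M):
--     """Standard SHA-256, returns H and all carry vectors."""
--     W=list(M)+[0]*(64-len(M))
--     for i in range(16,64): W[i]=(ssig1(W[i-2])+W[i-7]+ssig0(W[i-15])+W[i-16])&MASK32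
--     a,b,c,d,e,f,g,h=IV
--     all_carries = []
--     for r in range(64):
--         # T1 = h + sig1(e) + ch(e,f,g) + K[r] + W[r]  (4 additions)
--         s1, c1 = add_with_carry(h, sig1(e))
--         s2, c2 = add_with_carry(s1, ch(e,f,g))
--         s3, c3 = add_with_carry(s2, K[r])
--         T1, c4 = add_with_carry(s3, W[r])
--         # T2 = sig0(a) + maj(a,b,c)  (1 addition)
--         T2, c5 = add_with_carry(sig0(a), maj(a,b,c))
--         # e_new = d + T1  (1 addition)
--         e_new, c6 = add_with_carry(d, T1)
--         # a_new = T1 + T2  (1 addition)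
--         a_new, c7 = add_with_carry(T1, T2)
--
--         all_carries.append((c1,c2,c3,c4,c5,c6,c7))
--         h,g,f=g,f,e; e=e_new; d,c,b=c,b,a; a=a_new
--
--     H = tuple((s+v)&MASK32 for s,v in zip([a,b,c,d,e,f,g,h],IV))
--     return H, all_carries, W
-- ===== SOURCE B (Python) =====
-- MASK32 = 0xFFFFFFFF
--
-- K=[0x428a2f98,0x71374491,0xb5c0fbcf,0xe9b5dba5,0x3956c25b,0x59f111f1,0x923f82a4,0xab1c5ed5,0xd807aa98,0x12835b01,0x243185be,0x550c7dc3,0x72be5d74,0x80deb1fe,0x9bdc06a7,0xc19bf174,0xe49b69c1,0xefbe4786,0x0fc19dc6,0x240ca1cc,0x2de92c6f,0x4a7484aa,0x5cb0a9dc,0x76f988da,0x983e5152,0xa831c66d,0xb00327c8,0xbf597fc7,0xc6e00bf3,0xd5a79147,0x06ca6351,0x14292967,0x27b70a85,0x2e1b2138,0x4d2c6dfc,0x53380d13,0x650a7354,0x766a0abb,0x81c2c92e,0x92722c85,0xa2bfe8a1,0xa81a664b,0xc24b8b70,0xc76c51a3,0xd192e819,0xd6990624,0xf40e3585,0x106a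a070,0x19a4c116,0x1e376c08,0x2748774c,0x34b0bcb5,0x391c0cb3,0x4ed8aa4a,0x5b9cca4f,0x682e6ff3,0x748f82ee,0x78a5636f,0x84c87814,0x8cc70208,0x90befffa,0xa4506ceb,0xbef9a3f7,0xc67178f2]
--
-- IV=[0x6a09e667,0xbb67ae85,0x3c6ef372,0xa54ff53a,0x510e527f,0x9b05688c,0x1f83d9ab,0x5be0cd19]
--
-- def rotr(x,n): return ((x>>n)|(x<<(32-n)))&MASK32
--
-- def ssig0(x): return rotr(x,7)^rotr(x,18)^(x>>3)
--
-- def ssig1(x): return rotr(x,17)^rotr(x,19)^(x>>10)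
--
-- def sig0(x): return rotr(x,2)^rotr(x,13)^rotr(x,22)
--
-- def sig1(x): return rotr(x,6)^rotr(x,11)^rotr(x,25)
--
-- def ch(e,f,g): return (e&f)^(~e&g)&MASK32
--
-- def maj(a,b,c): return (a&b)^(a&c)^(b&c)
--
-- def csum32(a, b):
--     """(a+b) mod 2^32 together with its carry vector, both in closed form."""
--     return (a + b) & MASK32, ((a ^ b ^ (a + b)) >> 1) & MASK32
--
-- def add_chain(x, ys):
--     """Sum x with each of ys in turn, collecting every carry vector."""
--     cs = []
--     for y in ys:
--         x, c = csum32(x, y)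
--         cs.append(c)
--     return x, cs
--
-- def sha256_real(M):
--     """Standard SHA-256, returns H and all carry vectors."""
--     W = list(M) + [0] * (64 - len(M))
--     for i in range(16, 64):
--         W[i] = (ssig1(W[i-2]) + W[i-7] + ssig0(W[i-15]) + W[i-16]) & MASK32
--     v = list(IV)
--     all_carries = []
--     for k, w in zip(K, W):
--         T1, cs = add_chain(v[7], [sig1(v[4]), ch(v[4], v[5], v[6]), k, w])
--         T2, c5 = csum32(sig0(v[0]), maj(v[0], v[1], v[2]))
--         en, c6 = csum32(v[3], T1)
--         an, c7 = csum32(T1, T2)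
--         all_carries.append(tuple(cs) + (c5, c6, c7))
--         v = [an, v[0], v[1], v[2], en, v[4], v[5], v[6]]
--     H = tuple(csum32(s, i)[0] for s, i in zip(v, IV))
--     return H, all_carries, W
-- ===== Notes on version B (the rewrite author's own statement) =====
-- stated objective: alternative
-- what changed: Each 32-iteration bit-by-bit carry loop is replaced by the closed form ((a^b^(a+b))>>1)&MASK32, the four T1 carries come from one fold over the addend list, and the rounds iterate over zip(K, W) with the working state kept as a rotated 8-element list instead of eight unpacked variables over range(64).
import Mathlib
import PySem

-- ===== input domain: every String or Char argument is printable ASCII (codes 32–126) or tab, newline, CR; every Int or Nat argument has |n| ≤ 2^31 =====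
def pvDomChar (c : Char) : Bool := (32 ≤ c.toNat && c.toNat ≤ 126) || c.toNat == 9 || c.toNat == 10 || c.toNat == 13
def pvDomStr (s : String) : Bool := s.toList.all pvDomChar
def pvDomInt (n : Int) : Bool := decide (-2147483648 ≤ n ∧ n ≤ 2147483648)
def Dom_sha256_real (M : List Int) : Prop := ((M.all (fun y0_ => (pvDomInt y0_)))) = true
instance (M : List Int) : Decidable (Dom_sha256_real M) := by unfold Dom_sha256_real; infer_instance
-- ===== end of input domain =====

-- B replaces each 32-iteration carry loop by the closed form ((a^b^(a+b))>>1)&MASK32, collects the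
-- four T1 carries with one fold over the addend list, and runs the rounds over zip(K, W) with the
-- working state as a rotated 8-element list instead of eight unpacked variables over range(64).

-- ===== shared module constants and helpers (identical lines in both Python versions) =====
def MASK32 : Int := 0xFFFFFFFF

def K256 : List Int := [0x428a2f98,0x71374491,0xb5c0fbcf,0xe9b5dba5,0x3956c25b,0x59f111f1,0x923f82a4,0xab1c5ed5,0xd807aa98,0x12835b01,0x243185be,0x550c7dc3,0x72be5d74,0x80deb1fe,0x9bdc06a7,0xc19bf174,0xe49b69c1,0xefbe4786,0x0fc19dc6,0x240ca1cc,0x2de92c6f,0x4a7484aa,0x5cb0a9dc,0x76f988da,0x983e5152,0xa831c66d,0xb00327c8,0xbf597fc7,0xc6e00bf3,0xd5a79147,0x06ca6351,0x14292967,0x27b70a85,0x2e1b2138,0x4d2c6dfc,0x53380d13,0x650a7354,0x766a0abb,0x81c2c92e,0x92722c85,0xa2bfe8a1,0xa81a664b,0xc24b8b70,0xc76c51a3,0xd192e819,0xd6990624,0xf40e3585,0x106aa070,0x19a4c116,0x1e376c08,0x2748774c,0x34b0bcb5,0x391c0cb3,0x4ed8aa4a,0x5b9cca4f,0x682e6f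f3,0x748f82ee,0x78a5636f,0x84c87814,0x8cc70208,0x90befffa,0xa4506ceb,0xbef9a3f7,0xc67178f2]

def IV : List Int := [0x6a09e667,0xbb67ae85,0x3c6ef372,0xa54ff53a,0x510e527f,0x9b05688c,0x1f83d9ab,0x5be0cd19]

def rotr (x : Int) (n : Nat) : Int := PySem.Int.band (PySem.Int.bor (x >>> n) (x <<< (32 - n))) MASK32

def ssig0 (x : Int) : Int := PySem.Int.bxor (PySem.Int.bxor (rotr x 7) (rotr x 18)) (x >>> 3)

def ssig1 (x : Int) : Int := PySem.Int.bxor (PySem.Int.bxor (rotr x 17) (rotr x 19)) (x >>> 10)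

def sig0 (x : Int) : Int := PySem.Int.bxor (PySem.Int.bxor (rotr x 2) (rotr x 13)) (rotr x 22)

def sig1 (x : Int) : Int := PySem.Int.bxor (PySem.Int.bxor (rotr x 6) (rotr x 11)) (rotr x 25)

-- (e&f)^(~e&g)&MASK32  (& binds tighter than ^)
def ch (e f g : Int) : Int := PySem.Int.bxor (PySem.Int.band e f) (PySem.Int.band (PySem.Int.band (Int.not e) g) MASK32)

def maj (a b c : Int) : Int := PySem.Int.bxor (PySem.Int.bxor (PySem.Int.band a b) (PySem.Int.band a c)) (PySem.Int.band b c)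

-- ===== PORT A =====
-- add_with_carry: the 32-step carry loop  (state (c, cv))
def awcStep (a b : Int) (st : Int × Int) (k : Int) : Int × Int :=
  let ak := PySem.Int.band (a >>> k.toNat) 1
  let bk := PySem.Int.band (b >>> k.toNat) 1
  let c := PySem.Int.bor (PySem.Int.bor (PySem.Int.band ak bk) (PySem.Int.band ak st.1)) (PySem.Int.band bk st.1)
  (c, PySem.Int.bor st.2 (c <<< k.toNat))

def add_with_carry (a b : Int) : Int × Int :=
  let s := PySem.Int.band (a + b) MASK32
  let st := (PySem.List.pyRange 0 32 1).foldl (awcStep a b) (0, 0)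
  (s, st.2)

-- body of "for i in range(16,64): W[i] = ..."  (this loop is the same line in both Pythons)
def schedStep (W : List Int) (i : Int) : List Int :=
  PySem.List.pySetD W i (PySem.Int.band (ssig1 (PySem.List.pyGetD W (i-2) 0) + PySem.List.pyGetD W (i-7) 0 + ssig0 (PySem.List.pyGetD W (i-15) 0) + PySem.List.pyGetD W (i-16) 0) MASK32)

-- body of "for r in range(64): ..."  (state ((a,..,h), all_carries))
def roundStepA (W : List Int) (st : (Int×Int×Int×Int×Int×Int×Int×Int) × List (List Int)) (r : Int) :
    (Int×Int×Int×Int×Int×Int×Int×Int) × List (List Int) :=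
  match st with
  | ((a,b,c,d,e,f,g,h), carr) =>
    let p1 := add_with_carry h (sig1 e)
    let p2 := add_with_carry p1.1 (ch e f g)
    let p3 := add_with_carry p2.1 (PySem.List.pyGetD K256 r 0)
    let p4 := add_with_carry p3.1 (PySem.List.pyGetD W r 0)
    let p5 := add_with_carry (sig0 a) (maj a b c)
    let p6 := add_with_carry d p4.1
    let p7 := add_with_carry p4.1 p5.1
    ((p7.1, a, b, c, p6.1, e, f, g), carr ++ [[p1.2, p2.2, p3.2, p4.2, p5.2, p6.2, p7.2]])

def sha256_real (M : List Int) : List Int × List (List Int) × List Int :=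
  let W0 := M ++ PySem.List.pyRepeat [0] (64 - PySem.List.len M)
  let W := (PySem.List.pyRange 16 64 1).foldl schedStep W0
  let st := (PySem.List.pyRange 0 64 1).foldl (roundStepA W)
      ((0x6a09e667, 0xbb67ae85, 0x3c6ef372, 0xa54ff53a, 0x510e527f, 0x9b05688c, 0x1f83d9ab, 0x5be0cd19), [])
  match st with
  | ((a,b,c,d,e,f,g,h), carr) =>
    ((List.zip [a,b,c,d,e,f,g,h] IV).map (fun p => PySem.Int.band (p.1 + p.2) MASK32), carr, W)

-- ===== PORT B =====
-- closed-form sum and carry vector (no loop)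
def csum32 (a b : Int) : Int × Int :=
  (PySem.Int.band (a + b) MASK32, PySem.Int.band (PySem.Int.bxor (PySem.Int.bxor a b) (a + b) >>> (1:Nat)) MASK32)

-- fold csum32 over ys collecting the carries
def add_chain (x : Int) (ys : List Int) : Int × List Int :=
  ys.foldl (fun (p : Int × List Int) y => let q := csum32 p.1 y; (q.1, p.2 ++ [q.2])) (x, [])

-- body of "for k, w in zip(K, ws): ..."  (state (v, all_carries), v the 8-element list)
def roundStepB (st : List Int × List (List Int)) (kw : Int × Int) : List Int × List (List Int) :=
  let v := st.1
  let q1 := add_chain (PySem.List.pyGetD v 7 0)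
      [sig1 (PySem.List.pyGetD v 4 0), ch (PySem.List.pyGetD v 4 0) (PySem.List.pyGetD v 5 0) (PySem.List.pyGetD v 6 0), kw.1, kw.2]
  let q2 := csum32 (sig0 (PySem.List.pyGetD v 0 0)) (maj (PySem.List.pyGetD v 0 0) (PySem.List.pyGetD v 1 0) (PySem.List.pyGetD v 2 0))
  let q3 := csum32 (PySem.List.pyGetD v 3 0) q1.1
  let q4 := csum32 q1.1 q2.1
  ([q4.1, PySem.List.pyGetD v 0 0, PySem.List.pyGetD v 1 0, PySem.List.pyGetD v 2 0, q3.1,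
    PySem.List.pyGetD v 4 0, PySem.List.pyGetD v 5 0, PySem.List.pyGetD v 6 0],
   st.2 ++ [q1.2 ++ [q2.2, q3.2, q4.2]])

def sha256_real_alt (M : List Int) : List Int × List (List Int) × List Int :=
  let W0 := M ++ PySem.List.pyRepeat [0] (64 - PySem.List.len M)
  let W := (PySem.List.pyRange 16 64 1).foldl schedStep W0
  let st := (K256.zip W).foldl roundStepB (IV, [])
  ((List.zip st.1 IV).map (fun p => PySem.Int.band (p.1 + p.2) MASK32), st.2, W)

-- ===== PRECONDITION & SPEC =====
def Spec_sha256_real (M : List Int) (out : List Int × List (List Int) × List Int) : Prop := out = sha256_real_alt M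
instance (M : List Int) (out : List Int × List (List Int) × List Int) : Decidable (Spec_sha256_real M out) := by unfold Spec_sha256_real; infer_instance

-- ===== CLAIM (what is proved, stated in full; the proofs are below) =====
def Claim_equal_sha256_real : Prop := ∀ (M : List Int), Dom_sha256_real M → Spec_sha256_real M (sha256_real M)

-- ===== LEMMAS AND PROOFS =====

-- bit k of x, as an integer 0/1
def bitI (x : Int) (k : Nat) : Int := x / 2^k % 2

-- carry into bit position k when adding a and b
def cin (a b : Int) (k : Nat) : Int := (a % 2^k + b % 2^k) / 2^k

lemma ediv_eq_of (z p q r : Int) (hp : 0 < p) (hr0 : 0 ≤ r) (hrp : r < p) (h : z = p * q + r) :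
    z / p = q ∧ z % p = r :=
  (Int.ediv_emod_unique hp).mpr ⟨by omega, hr0, hrp⟩

lemma cin_cases (a b : Int) (k : Nat) : cin a b k = 0 ∨ cin a b k = 1 := by
  unfold cin
  have hp : (0:Int) < 2^k := by positivity
  have h1 := Int.emod_nonneg a (ne_of_gt hp)
  have h2 := Int.emod_nonneg b (ne_of_gt hp)
  have h3 := Int.emod_lt_of_pos a hp
  have h4 := Int.emod_lt_of_pos b hp
  have hub : (a % 2^k + b % 2^k) / 2^k ≤ (2 * 2^k - 1) / 2^k :=
    Int.ediv_le_ediv hp (by omega)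
  have hone : ((2:Int) * 2^k - 1) / 2^k = 1 := (ediv_eq_of (2*2^k-1) (2^k) 1 (2^k - 1) hp (by omega) (by omega) (by ring)).1
  have hlb : 0 ≤ (a % 2^k + b % 2^k) / 2^k := Int.ediv_nonneg (by omega) (le_of_lt hp)
  omega

lemma mod_double (z p : Int) (hp : 0 < p) : z % (2 * p) = z % p + p * (z / p % 2) := by
  have hq : z = p * (z / p) + z % p := by rw [Int.ediv_add_emod]
  have hq2 : z / p = 2 * (z / p / 2) + z / p % 2 := by omega
  have h1 := Int.emod_nonneg z (ne_of_gt hp)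
  have h2 := Int.emod_lt_of_pos z hp
  have hm2 : z / p % 2 = 0 ∨ z / p % 2 = 1 := Int.emod_two_eq _
  refine (ediv_eq_of z (2*p) (z / p / 2) (z % p + p * (z / p % 2)) (by omega) (by rcases hm2 with h|h <;> simp [h] <;> omega) (by rcases hm2 with h|h <;> simp [h] <;> omega) ?_).2
  calc z = p * (z / p) + z % p := hq
    _ = p * (2 * (z / p / 2) + z / p % 2) + z % p := by rw [← hq2]
    _ = 2 * p * (z / p / 2) + (z % p + p * (z / p % 2)) := by ring

lemma cin_succ (a b : Int) (k : Nat) :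
    cin a b (k+1) = (bitI a k + bitI b k + cin a b k) / 2 := by
  have hp : (0:Int) < 2^k := by positivity
  have hpow : (2:Int)^(k+1) = 2 * 2^k := by rw [pow_succ]; ring
  unfold cin bitI
  rw [hpow, mod_double a _ hp, mod_double b _ hp]
  set p : Int := 2^k with hpdef
  set ax := a / p % 2 with hax
  set bx := b / p % 2 with hbx
  set ra := a % p with hra
  set rb := b % p with hrb
  have h1 : 0 ≤ ra := Int.emod_nonneg a (ne_of_gt hp)
  have h2 : 0 ≤ rb := Int.emod_nonneg b (ne_of_gt hp)
  have h3 : ra < p := Int.emod_lt_of_pos a hp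
  have h4 : rb < p := Int.emod_lt_of_pos b hp
  have haxc : ax = 0 ∨ ax = 1 := Int.emod_two_eq _
  have hbxc : bx = 0 ∨ bx = 1 := Int.emod_two_eq _
  have hc : ra + rb = p * ((ra + rb)/p) + (ra+rb) % p := by rw [Int.ediv_add_emod]
  have h5 : 0 ≤ (ra+rb) % p := Int.emod_nonneg _ (ne_of_gt hp)
  have h6 : (ra+rb) % p < p := Int.emod_lt_of_pos _ hp
  set c := (ra + rb)/p with hcdef
  set t := ax + bx + c with htdef
  have ht2 : t = 2 * (t/2) + t % 2 := by omega
  have htm : t % 2 = 0 ∨ t % 2 = 1 := Int.emod_two_eq _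
  refine (ediv_eq_of _ (2*p) (t/2) (p * (t % 2) + (ra+rb) % p) (by omega) ?_ ?_ ?_).1
  · rcases htm with h|h <;> simp [h] <;> omega
  · rcases htm with h|h <;> simp [h] <;> omega
  · calc ra + p * ax + (rb + p * bx) = (ra + rb) + p * (ax + bx) := by ring
      _ = p * (c + ax + bx) + (ra+rb) % p := by linear_combination hc
      _ = p * t + (ra+rb) % p := by rw [htdef]; ring
      _ = p * (2 * (t/2) + t % 2) + (ra+rb) % p := by rw [← ht2]
      _ = 2 * p * (t/2) + (p * (t % 2) + (ra+rb) % p) := by ring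

lemma sum_div (a b : Int) (k : Nat) : (a + b) / 2^k = a / 2^k + b / 2^k + cin a b k := by
  have hp : (0:Int) < 2^k := by positivity
  unfold cin
  set p : Int := 2^k
  have ha : a = p * (a/p) + a % p := by rw [Int.ediv_add_emod]
  have hb : b = p * (b/p) + b % p := by rw [Int.ediv_add_emod]
  set ra := a % p; set rb := b % p
  have h1 : 0 ≤ ra := Int.emod_nonneg a (ne_of_gt hp)
  have h2 : 0 ≤ rb := Int.emod_nonneg b (ne_of_gt hp)
  have h3 : ra < p := Int.emod_lt_of_pos a hp
  have h4 : rb < p := Int.emod_lt_of_pos b hp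
  have hc : ra + rb = p * ((ra + rb)/p) + (ra+rb) % p := by rw [Int.ediv_add_emod]
  have h5 : 0 ≤ (ra+rb) % p := Int.emod_nonneg _ (ne_of_gt hp)
  have h6 : (ra+rb) % p < p := Int.emod_lt_of_pos _ hp
  refine (ediv_eq_of _ p _ ((ra+rb) % p) hp h5 h6 ?_).1
  calc a + b = (p * (a/p) + ra) + (p * (b/p) + rb) := by rw [← ha, ← hb]
    _ = p * (a/p + b/p) + (ra + rb) := by ring
    _ = p * (a/p + b/p) + (p * ((ra+rb)/p) + (ra+rb)%p) := by rw [← hc]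
    _ = p * (a/p + b/p + (ra+rb)/p) + (ra+rb)%p := by ring

lemma bxor_eq_xor (x y : Int) : PySem.Int.bxor x y = Int.xor x y := by
  cases x with
  | ofNat m => cases y with
    | ofNat n =>
        show PySem.Int.bxor (↑m) (↑n) = Int.xor (Int.ofNat m) (Int.ofNat n)
        simp [PySem.Int.bxor, Int.xor]
    | negSucc n =>
        show PySem.Int.bxor (↑m) (Int.negSucc n) = Int.xor (Int.ofNat m) (Int.negSucc n)
        simp only [PySem.Int.bxor, Int.xor, Int.negSucc_eq]
        rw [if_pos (by positivity), if_neg (by omega)]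
        have : (-(↑n + 1) * -1 - 1 : Int) = ↑n := by ring
        norm_num
        omega
  | negSucc m => cases y with
    | ofNat n =>
        show PySem.Int.bxor (Int.negSucc m) (↑n) = Int.xor (Int.negSucc m) (Int.ofNat n)
        simp only [PySem.Int.bxor, Int.xor, Int.negSucc_eq]
        rw [if_neg (by omega), if_pos (by positivity)]
        norm_num
        omega
    | negSucc n =>
        show PySem.Int.bxor (Int.negSucc m) (Int.negSucc n) = Int.xor (Int.negSucc m) (Int.negSucc n)
        simp only [PySem.Int.bxor, Int.xor, Int.negSucc_eq]
        rw [if_neg (by omega), if_neg (by omega)]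
        norm_num

lemma bitI_ite_testBit (z : Int) (k : Nat) : bitI z k = if Int.testBit z k then 1 else 0 := by
  cases z with
  | ofNat n =>
      show bitI (↑n) k = if Int.testBit (Int.ofNat n) k then 1 else 0
      have h1 : Int.testBit (Int.ofNat n) k = Nat.testBit n k := rfl
      rw [h1, Nat.testBit_eq_decide_div_mod_eq]
      unfold bitI
      have h2 : ((n : Int)) / 2^k = ((n / 2^k : Nat) : Int) := by
        rw [Int.natCast_ediv]; push_cast; ring
      rw [h2]
      have h3 : ((n / 2^k : Nat) : Int) % 2 = ((n / 2^k % 2 : Nat) : Int) := by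
        rw [Int.natCast_emod]; push_cast; ring
      rw [h3]
      by_cases h : n / 2^k % 2 = 1 <;> simp [h] <;> omega
  | negSucc n =>
      have h1 : Int.testBit (Int.negSucc n) k = !(Nat.testBit n k) := rfl
      rw [h1, Nat.testBit_eq_decide_div_mod_eq]
      unfold bitI
      have hp : (0:Int) < 2^k := by positivity
      set q0 : Int := (n : Int) / 2^k with hq0
      have hr1 : 0 ≤ (n:Int) % 2^k := Int.emod_nonneg _ (ne_of_gt hp)
      have hr2 : (n:Int) % 2^k < 2^k := Int.emod_lt_of_pos _ hp
      have hn : (n:Int) = 2^k * q0 + (n:Int) % 2^k := by rw [Int.ediv_add_emod]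
      have hdiv : (Int.negSucc n) / 2^k = -q0 - 1 := by
        rw [Int.negSucc_eq]
        exact (ediv_eq_of _ (2^k) (-q0-1) (2^k - 1 - (n:Int) % 2^k) hp (by omega) (by omega)
          (by linear_combination -hn)).1
      rw [hdiv]
      have hcast : q0 = ((n / 2^k : Nat) : Int) := by
        rw [hq0, Int.natCast_ediv]; push_cast; ring
      set u : Nat := n / 2^k with hu
      by_cases h : u % 2 = 1
      · simp only [h, decide_true, Bool.not_true, Bool.false_eq_true, if_false]
        omega
      · simp only [h, decide_false, Bool.not_false, if_true]
        omega

lemma bitI_cases (x : Int) (k : Nat) : bitI x k = 0 ∨ bitI x k = 1 := by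
  unfold bitI; exact Int.emod_two_eq _

lemma bitI_bxor (x y : Int) (k : Nat) : bitI (PySem.Int.bxor x y) k = (bitI x k + bitI y k) % 2 := by
  rw [bitI_ite_testBit, bitI_ite_testBit x, bitI_ite_testBit y, bxor_eq_xor, Int.testBit_lxor]
  cases hx : Int.testBit x k <;> cases hy : Int.testBit y k <;> simp

lemma bitI_X (a b : Int) (k : Nat) :
    bitI (PySem.Int.bxor (PySem.Int.bxor a b) (a + b)) k = cin a b k := by
  rw [bitI_bxor, bitI_bxor]
  have hs : bitI (a+b) k = (bitI a k + bitI b k + cin a b k) % 2 := by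
    unfold bitI
    rw [sum_div]
    omega
  rw [hs]
  rcases bitI_cases a k with h1|h1 <;> rcases bitI_cases b k with h2|h2 <;>
    rcases cin_cases a b k with h3|h3 <;> rw [h1, h2, h3] <;> decide

lemma band_mask (z : Int) : PySem.Int.band z 4294967295 = z % 4294967296 := by
  cases z with
  | ofNat n =>
      show PySem.Int.band (↑n) (↑(4294967295 : Nat)) = (↑n) % 4294967296
      rw [PySem.Int.band_natCast]
      have h1 : (4294967295 : Nat) = 2^32 - 1 := by norm_num
      rw [h1, Nat.and_two_pow_sub_one_eq_mod, Int.natCast_emod]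
      norm_num
  | negSucc n =>
      have hneg : ¬ (0:Int) ≤ Int.negSucc n := by omega
      have h2 : (-(Int.negSucc n) - 1).toNat = n := by rw [Int.negSucc_eq]; omega
      rw [show (4294967295 : Int) = ((4294967295:Nat) : Int) by norm_num]
      unfold PySem.Int.band
      rw [if_neg hneg, if_pos (by positivity)]
      rw [h2, Int.toNat_natCast]
      have h3 : (4294967295 : Nat) &&& n = n % 4294967296 := by
        rw [Nat.land_comm, show (4294967295:Nat) = 2^32-1 by norm_num, Nat.and_two_pow_sub_one_eq_mod]
      rw [h3]
      have h4 : n % 4294967296 ≤ 4294967295 := by omega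
      rw [Int.negSucc_eq]
      have h5 : ((4294967295 - n % 4294967296 : Nat) : Int) = 4294967295 - ((n % 4294967296 : Nat) : Int) := by
        push_cast [h4]; ring
      rw [h5]
      have h6 : ((n % 4294967296 : Nat) : Int) = (n : Int) % 4294967296 := by
        rw [Int.natCast_emod]; norm_num
      omega

lemma nat_lor_pow (x k : Nat) (h : x < 2^k) : x ||| 2^k = x + 2^k := by
  apply Nat.eq_of_testBit_eq
  intro i
  rw [Nat.testBit_lor, Nat.testBit_two_pow]
  rcases lt_trichotomy i k with hi|hi|hi
  · have hd : 2^k = 2^i * 2^(k-i) := by rw [← pow_add]; congr 1; omega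
    rw [Nat.testBit_eq_decide_div_mod_eq, Nat.testBit_eq_decide_div_mod_eq]
    have : (x + 2^k) / 2^i = x / 2^i + 2^(k-i) := by
      rw [hd, Nat.add_mul_div_left _ _ (by positivity)]
    rw [this]
    have he : 2^(k-i) % 2 = 0 := by
      have : k - i ≠ 0 := by omega
      rcases Nat.exists_eq_succ_of_ne_zero this with ⟨m, hm⟩
      rw [hm, pow_succ]
      omega
    have hki : ¬ (k = i) := by omega
    simp only [hki, decide_false, Bool.or_false, decide_eq_decide]
    omega
  · subst hi
    rw [Nat.testBit_lt_two_pow h, Nat.testBit_eq_decide_div_mod_eq]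
    have : (x + 2^i) / 2^i = 1 := by
      rw [Nat.add_div_right _ (by positivity), Nat.div_eq_of_lt h]
    rw [this]
    simp
  · have hx1 : x < 2^i := lt_of_lt_of_le h (Nat.pow_le_pow_right (by norm_num) (le_of_lt hi))
    have hx2 : x + 2^k < 2^i := by
      have : 2^(k+1) ≤ 2^i := Nat.pow_le_pow_right (by norm_num) (by omega)
      have : 2^k + 2^k ≤ 2^i := by rw [← two_mul]; rw [pow_succ] at this; omega
      omega
    rw [Nat.testBit_lt_two_pow hx1, Nat.testBit_lt_two_pow hx2]
    have hki : ¬ (k = i) := by omega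
    simp [hki]

lemma bor_low_pow (x c : Int) (k : Nat) (hx0 : 0 ≤ x) (hx : x < 2^k) (hc : c = 0 ∨ c = 1) :
    PySem.Int.bor x (c <<< k) = x + c * 2^k := by
  rcases hc with h|h
  · subst h
    rw [Int.shiftLeft_eq]
    simp [PySem.Int.bor_zero]
  · subst h
    rw [Int.shiftLeft_eq, one_mul]
    have hp : (0:Int) ≤ 2^k := by positivity
    rw [PySem.Int.bor_of_nonneg hx0 hp]
    have h1 : ((2:Int)^k).toNat = 2^k := by
      rw [show ((2:Int)^k) = ((2^k : Nat) : Int) by push_cast; ring, Int.toNat_natCast]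
    rw [h1, nat_lor_pow x.toNat k (by omega)]
    push_cast
    omega

lemma emod_pow_eq_sum (z : Int) (n : Nat) :
    z % 2^n = ∑ k ∈ Finset.range n, bitI z k * 2^k := by
  induction n with
  | zero => simp
  | succ n ih =>
      have hp : (0:Int) < 2^n := by positivity
      have hpow : (2:Int)^(n+1) = 2 * 2^n := by rw [pow_succ]; ring
      rw [hpow, mod_double z _ hp, Finset.sum_range_succ, ← ih]
      unfold bitI
      ring

def csum (a b : Int) (n : Nat) : Int := ∑ k ∈ Finset.range n, cin a b (k+1) * 2^k

lemma csum_bound (a b : Int) (n : Nat) : 0 ≤ csum a b n ∧ csum a b n < 2^n := by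
  induction n with
  | zero => simp [csum]
  | succ n ih =>
      have h : csum a b (n+1) = csum a b n + cin a b (n+1) * 2^n := by
        unfold csum; rw [Finset.sum_range_succ]
      have hp : (0:Int) < 2^n := by positivity
      have hpow : (2:Int)^(n+1) = 2 * 2^n := by rw [pow_succ]; ring
      rcases cin_cases a b (n+1) with hc|hc <;> rw [h, hc, hpow] <;> constructor <;> nlinarith [ih.1, ih.2]

lemma maj_bits (x y z : Int) (hx : x = 0 ∨ x = 1) (hy : y = 0 ∨ y = 1) (hz : z = 0 ∨ z = 1) :
    PySem.Int.bor (PySem.Int.bor (PySem.Int.band x y) (PySem.Int.band x z)) (PySem.Int.band y z)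
      = (x + y + z) / 2 := by
  rcases hx with h|h <;> subst h <;> rcases hy with h|h <;> subst h <;> rcases hz with h|h <;> subst h <;> decide

lemma bit_extract (a : Int) (n : Nat) : PySem.Int.band (a >>> n) 1 = bitI a n := by
  rw [PySem.Int.band_one, PySem.Int.mod_eq_emod_of_pos (by norm_num), Int.shiftRight_eq_div_pow]
  unfold bitI
  push_cast
  ring_nf

lemma awc_loop (a b : Int) (n : Nat) :
    (PySem.List.pyRange 0 (n:Int) 1).foldl (awcStep a b) (0, 0) = (cin a b n, csum a b n) := by
  induction n with
  | zero =>
      rw [PySem.List.pyRange_one_eq_nil (by norm_num)]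
      simp [cin, csum]
  | succ n ih =>
      have hcast : ((n+1 : Nat) : Int) = (n : Int) + 1 := by push_cast; ring
      rw [hcast, PySem.List.pyRange_one_succ_right (by positivity), List.foldl_append, ih]
      simp only [List.foldl_cons, List.foldl_nil]
      show awcStep a b (cin a b n, csum a b n) (n : Int) = _
      unfold awcStep
      simp only [Int.toNat_natCast]
      rw [bit_extract, bit_extract]
      rw [maj_bits _ _ _ (bitI_cases a n) (bitI_cases b n) (cin_cases a b n)]
      rw [← cin_succ]
      rw [bor_low_pow _ _ n (csum_bound a b n).1 (csum_bound a b n).2 (cin_cases a b (n+1))]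
      have : csum a b n + cin a b (n+1) * 2^n = csum a b (n+1) := by
        unfold csum; rw [Finset.sum_range_succ]
      rw [this]

lemma bitI_div2 (z : Int) (k : Nat) : bitI (z / 2) k = bitI z (k+1) := by
  unfold bitI
  rw [Int.ediv_ediv_of_nonneg (by norm_num)]
  congr 2
  rw [pow_succ]
  ring

lemma add_eq (a b : Int) : add_with_carry a b = csum32 a b := by
  have h1 : PySem.Int.bxor (PySem.Int.bxor a b) (a + b) >>> (1:Nat)
      = PySem.Int.bxor (PySem.Int.bxor a b) (a + b) / 2 := by
    rw [Int.shiftRight_eq_div_pow]; norm_num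
  have hcv : PySem.Int.band (PySem.Int.bxor (PySem.Int.bxor a b) (a + b) / 2) MASK32 = csum a b 32 := by
    rw [show MASK32 = 4294967295 from rfl, band_mask]
    rw [show (4294967296:Int) = 2^32 by norm_num, emod_pow_eq_sum]
    unfold csum
    apply Finset.sum_congr rfl
    intro k _
    rw [bitI_div2, bitI_X]
  unfold add_with_carry csum32
  dsimp only
  rw [show ((32:Int)) = ((32:Nat):Int) by norm_num, awc_loop, h1, hcv]

lemma K256_len : K256.length = 64 := rfl

-- the round simulation: A's tuple-state fold over range(64) tracks B's list-state fold over zip(K, ws)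
def t8l (t : Int×Int×Int×Int×Int×Int×Int×Int) : List Int :=
  [t.1, t.2.1, t.2.2.1, t.2.2.2.1, t.2.2.2.2.1, t.2.2.2.2.2.1, t.2.2.2.2.2.2.1, t.2.2.2.2.2.2.2]

lemma round_sim (ws : List Int) (hlen : 64 ≤ ws.length) (n : Nat) (hn : n ≤ 64) :
    ((K256.zip ws).take n).foldl roundStepB (IV, [])
      = (t8l ((PySem.List.pyRange 0 (n:Int) 1).foldl (roundStepA ws)
          ((0x6a09e667, 0xbb67ae85, 0x3c6ef372, 0xa54ff53a, 0x510e527f, 0x9b05688c, 0x1f83d9ab, 0x5be0cd19), [])).1,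
         ((PySem.List.pyRange 0 (n:Int) 1).foldl (roundStepA ws)
          ((0x6a09e667, 0xbb67ae85, 0x3c6ef372, 0xa54ff53a, 0x510e527f, 0x9b05688c, 0x1f83d9ab, 0x5be0cd19), [])).2) := by
  induction n with
  | zero =>
      rw [show ((0:Nat):Int) = 0 by norm_num, PySem.List.pyRange_one_eq_nil (le_refl _)]
      rfl
  | succ n ih =>
      have hK : n < K256.length := by rw [K256_len]; omega
      have hw : n < ws.length := by omega
      have hz : n < (K256.zip ws).length := by rw [List.length_zip, K256_len]; omega
      have hcast : ((n+1 : Nat) : Int) = (n : Int) + 1 := by push_cast; ring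
      have htake : (K256.zip ws).take (n+1) = (K256.zip ws).take n ++ [(K256[n], ws[n])] := by
        rw [List.take_succ]
        simp [List.getElem?_eq_getElem hz, List.getElem_zip]
      rw [hcast, PySem.List.pyRange_one_succ_right (by positivity), htake, List.foldl_append,
        List.foldl_append, ih (by omega)]
      simp only [List.foldl_cons, List.foldl_nil]
      have hKr : PySem.List.pyGetD K256 ((n : Nat) : Int) 0 = K256[n] := by
        rw [PySem.List.pyGetD_natCast, List.getD_eq_getElem _ _ hK]
      have hwr : PySem.List.pyGetD ws ((n : Nat) : Int) 0 = ws[n] := by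
        rw [PySem.List.pyGetD_natCast, List.getD_eq_getElem _ _ hw]
      set sA := (PySem.List.pyRange 0 (n:Int) 1).foldl (roundStepA ws)
          ((0x6a09e667, 0xbb67ae85, 0x3c6ef372, 0xa54ff53a, 0x510e527f, 0x9b05688c, 0x1f83d9ab, 0x5be0cd19), ([] : List (List Int))) with hsA
      clear_value sA
      obtain ⟨⟨a,b,c,d,e,f,g,h⟩,carr⟩ := sA
      simp only [roundStepA, roundStepB, t8l, add_chain, add_eq, hKr, hwr,
        List.foldl_cons, List.foldl_nil]
      simp [PySem.List.pyGetD, PySem.List.pyIdx?]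

lemma main_eq (M : List Int) : sha256_real M = sha256_real_alt M := by
  simp only [sha256_real, sha256_real_alt]
  set W0 := M ++ PySem.List.pyRepeat [0] (64 - PySem.List.len M) with hW0
  have hW0len : 64 ≤ W0.length := by
    simp only [hW0, PySem.List.pyRepeat_singleton, PySem.List.len_eq, List.length_append,
      List.length_replicate]
    omega
  set ws := (PySem.List.pyRange 16 64 1).foldl schedStep W0 with hwsdef
  have hwslen : 64 ≤ ws.length := by
    have : ws.length = W0.length := by
      rw [hwsdef]
      have : ∀ (l : List Int) (W : List Int), (l.foldl schedStep W).length = W.length := by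
        intro l
        induction l with
        | nil => intro W; rfl
        | cons x xs ih =>
            intro W
            simp only [List.foldl_cons, ih]
            unfold schedStep
            exact PySem.List.length_pySetD ..
      exact this _ _
    omega
  have hB := round_sim ws hwslen 64 (le_refl _)
  have hzl : (K256.zip ws).length ≤ 64 := by rw [List.length_zip, K256_len]; omega
  rw [List.take_of_length_le hzl] at hB
  have h64 : PySem.List.pyRange 0 64 1 = PySem.List.pyRange 0 ((64:Nat):Int) 1 := by norm_num
  rw [h64, hB]
  set sA := (PySem.List.pyRange 0 ((64:Nat):Int) 1).foldl (roundStepA ws)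
      ((0x6a09e667, 0xbb67ae85, 0x3c6ef372, 0xa54ff53a, 0x510e527f, 0x9b05688c, 0x1f83d9ab, 0x5be0cd19), ([] : List (List Int))) with hsA
  clear_value sA
  obtain ⟨⟨a,b,c,d,e,f,g,h⟩,carr⟩ := sA
  rfl

-- ===== VERDICT (by name: the statement is the Claim_ definition above) =====
theorem sha256_real_spec : Claim_equal_sha256_real := by
  intro M _
  unfold Spec_sha256_real
  exact main_eq M
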